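-- pv_equiv track=rewrite | github.com/Sanchez2047/scrabble-scorer-python | scrabble_scorer.py | vowel_bonus_scorer
-- ===== SOURCE A (Python) =====
-- def vowel_bonus_scorer(word):
-- 	vowels = ["A","E","I","O","U"]
-- 	total = 0
-- 	word = word.replace(" ", "")
-- 	for char in word:
-- 		if char.upper() not in vowels:
-- 			total += 1
-- 		else:
-- 			total += 3
-- 	return total
-- ===== SOURCE B (Python) =====
-- def vowel_bonus_scorer(word):
--     # Build a frequency table of the space-stripped word once, then score each
--     # DISTINCT character and weight it by its multiplicity.
--     counts = {}
--     for c in word.replace(" ", ""):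
--         counts[c] = counts.get(c, 0) + 1
--     total = 0
--     for c, n in counts.items():
--         total += n * (3 if c.upper() in "AEIOU" else 1)
--     return total
-- ===== Notes on version B (the rewrite author's own statement) =====
-- stated objective: alternative
-- what changed: Replaces the per-character +1/+3 accumulator loop by a two-stage frequency-table algorithm: build a character counter of the space-stripped word, then sum multiplicity times score over the distinct characters.
import Mathlib
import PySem

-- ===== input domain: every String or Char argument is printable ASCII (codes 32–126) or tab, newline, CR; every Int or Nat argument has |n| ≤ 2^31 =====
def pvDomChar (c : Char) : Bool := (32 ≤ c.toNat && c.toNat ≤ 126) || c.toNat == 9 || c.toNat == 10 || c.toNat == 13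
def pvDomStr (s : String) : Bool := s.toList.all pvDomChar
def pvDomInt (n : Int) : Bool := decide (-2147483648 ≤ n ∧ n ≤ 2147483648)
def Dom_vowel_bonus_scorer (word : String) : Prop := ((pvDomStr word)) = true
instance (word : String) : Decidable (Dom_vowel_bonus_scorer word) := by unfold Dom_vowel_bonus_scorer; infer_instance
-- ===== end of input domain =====

-- B replaces A's per-character +1/+3 accumulator loop by a two-stage frequency-table
-- algorithm: build a counter of the space-stripped word, then sum multiplicity × score
-- over the distinct characters (objective: alternative).

-- ===== PORT A =====
-- char.upper() on a single char is PySem.Chars.upperChar; 'char.upper() not in vowels'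
-- (a list of single-char strings) coincides with Char non-membership (exact).
def vowel_bonus_scorer (word : String) : Int :=
  let vowels : List Char := ['A', 'E', 'I', 'O', 'U']
  let word' := PySem.Str.replace word " " ""
  word'.toList.foldl
    (fun total char =>
      if PySem.Chars.upperChar char ∉ vowels then total + 1 else total + 3) 0

-- ===== PORT B =====
-- 'c.upper() in "AEIOU"' is substring membership of the single-char string c.upper();
-- ported as PySem.Chars.isIn [upperChar c] "AEIOU".toList (exact).
def vowel_bonus_scorer_alt (word : String) : Int :=
  let counts : PySem.Dict Char Int :=
    (PySem.Str.replace word " " "").toList.foldl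
      (fun d c => d.insert c (d.getD c 0 + 1)) PySem.Dict.empty
  counts.items.foldl
    (fun total p =>
      total + p.2 * (if PySem.Chars.isIn [PySem.Chars.upperChar p.1] "AEIOU".toList then 3 else 1)) 0

-- ===== PRECONDITION & SPEC =====
def Spec_vowel_bonus_scorer (word : String) (out : Int) : Prop := out = vowel_bonus_scorer_alt word
instance (word : String) (out : Int) : Decidable (Spec_vowel_bonus_scorer word out) := by unfold Spec_vowel_bonus_scorer; infer_instance

-- ===== CLAIM (what is proved, stated in full; the proofs are below) =====
def Claim_equal_vowel_bonus_scorer : Prop := ∀ (word : String), Dom_vowel_bonus_scorer word → Spec_vowel_bonus_scorer word (vowel_bonus_scorer word)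

-- ===== LEMMAS AND PROOFS =====

-- weighting each DISTINCT element by its multiplicity recovers the plain sum over the list
theorem sum_count_mul (l : List Char) (f : Char → Int) :
    ((PySem.Set.ofList l).map (fun k => (l.count k : Int) * f k)).sum = (l.map f).sum := by
  have hs : (PySem.Set.ofList l).toFinset = l.toFinset := by
    ext c; simp [List.mem_toFinset, PySem.Set.mem_ofList]
  rw [Finset.sum_list_map_count l f,
      Finset.sum_list_map_count (PySem.Set.ofList l) (fun k => (l.count k : Int) * f k), hs]
  apply Finset.sum_congr rfl
  intro m hm
  rw [List.count_eq_one_of_mem (PySem.Set.nodup_ofList l)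
      ((PySem.Set.mem_ofList l m).2 (List.mem_toFinset.1 hm))]
  simp

-- the singleton-substring test 'c in s' is Char membership
theorem isIn_singleton (c : Char) (l : List Char) :
    PySem.Chars.isIn [c] l = decide (c ∈ l) := by
  rcases hb : PySem.Chars.isIn [c] l with _ | _
  · have h := (PySem.Chars.isIn_eq_false_iff [c] l).1 hb
    simp [List.singleton_infix_iff] at h; simp [h]
  · have h := (PySem.Chars.isIn_iff_infix [c] l).1 hb
    simp [List.singleton_infix_iff] at h; simp [h]

-- ===== VERDICT (by name: the statement is the Claim_ definition above) =====
theorem vowel_bonus_scorer_spec : Claim_equal_vowel_bonus_scorer := by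
  intro word _
  unfold Spec_vowel_bonus_scorer vowel_bonus_scorer vowel_bonus_scorer_alt
  simp only []
  generalize (PySem.Str.replace word " " "").toList = l
  rw [PySem.Dict.foldl_insert_getD_add_one_eq_counter,
      PySem.List.foldl_add (g := fun p : Char × Int =>
        p.2 * (if PySem.Chars.isIn [PySem.Chars.upperChar p.1] "AEIOU".toList then 3 else 1)),
      PySem.Dict.items_counter, List.map_map]
  have hA : l.foldl
      (fun total char =>
        if PySem.Chars.upperChar char ∉ ['A', 'E', 'I', 'O', 'U'] then total + 1 else total + 3) (0:Int)
      = l.foldl (fun total c => total +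
          (if PySem.Chars.isIn [PySem.Chars.upperChar c] "AEIOU".toList then 3 else 1)) (0:Int) :=
    PySem.List.foldl_congr_mem l _ _ _
      (by intro acc c _
          rw [isIn_singleton]
          by_cases h : PySem.Chars.upperChar c ∈ ['A', 'E', 'I', 'O', 'U'] <;> simp [h])
  rw [hA, PySem.List.foldl_add, zero_add, zero_add]
  rw [show ((fun p : Char × Int =>
          p.2 * (if PySem.Chars.isIn [PySem.Chars.upperChar p.1] "AEIOU".toList then (3:Int) else 1)) ∘
        (fun k => (k, (l.count k : Int)))) =
      (fun k => (l.count k : Int) *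
          (if PySem.Chars.isIn [PySem.Chars.upperChar k] "AEIOU".toList then 3 else 1)) from rfl]
  exact (sum_count_mul l _).symm
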